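-- pv_equiv track=rewrite | github.com/PedroRAlberti/estudo | prog_impatech/prog_1/lista-8/8-1.py | caralho
-- ===== SOURCE A (Python) =====
-- def caralho (a,b):
--     lista_final = []
--     while a != [] and b != []:
--         if a == []:
--             lista_final.append(b[0])
--             b.remove(b[0])
--             continue
--         if b == []:
--             lista_final.append(a[0])
--             a.remove(a[0])
--             continue
--
--         if a[0] >= b[0]:
--             lista_final.append(a[0])
--             a.remove(a[0])
--             continue
--         if b[0] > a[0]:
--             lista_final.append(b[0])
--             b.remove(b[0])
--     return lista_final
-- ===== SOURCE B (Python) =====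
-- def caralho(a, b):
--     i = j = 0
--     la, lb = len(a), len(b)
--     out = []
--     while i < la and j < lb:
--         if a[i] >= b[j]:
--             out.append(a[i])
--             i += 1
--         else:
--             out.append(b[j])
--             j += 1
--     return out
-- ===== Notes on version B (the rewrite author's own statement) =====
-- stated objective: faster
-- what changed: B replaces A's repeated list.remove of the head (an O(n) scan-and-shift per element) by a two-pointer index merge that never mutates or rescans the lists.
import Mathlib
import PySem

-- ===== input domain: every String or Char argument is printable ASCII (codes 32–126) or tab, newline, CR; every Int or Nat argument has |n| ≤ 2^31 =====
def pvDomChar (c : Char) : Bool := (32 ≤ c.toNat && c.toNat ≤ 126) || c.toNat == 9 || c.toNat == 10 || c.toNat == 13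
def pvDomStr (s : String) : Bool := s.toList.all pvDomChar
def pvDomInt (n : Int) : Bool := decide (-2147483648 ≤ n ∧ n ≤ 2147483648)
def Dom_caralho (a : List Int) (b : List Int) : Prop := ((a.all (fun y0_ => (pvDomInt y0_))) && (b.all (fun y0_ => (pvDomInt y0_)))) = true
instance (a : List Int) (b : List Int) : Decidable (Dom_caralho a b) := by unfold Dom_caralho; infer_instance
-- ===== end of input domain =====

-- B: two-pointer index merge instead of A's repeated head-remove (asymptotically faster);
-- A mutates its argument lists in place (remove), B does not: the equivalence proved is about the return value only.
-- ===== PORT A =====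
-- A's while loop: both lists nonempty; the inner `a == []` / `b == []` branches are unreachable
-- under the guard and correspond to the fall-through `| _, _ => acc` once either list is empty;
-- `lst.remove(lst[0])` removes the first occurrence of the head, i.e. the head itself.
def caralho_loop (a : List Int) (b : List Int) (lista_final : List Int) : List Int :=
  match a, b with
  | x :: a', y :: b' =>
      if x ≥ y then caralho_loop a' (y :: b') (lista_final ++ [x])
      else caralho_loop (x :: a') b' (lista_final ++ [y])
  | _, _ => lista_final

def caralho (a : List Int) (b : List Int) : List Int := caralho_loop a b []

-- ===== PORT B =====
def caralho_alt_loop (a : List Int) (b : List Int) (i j : Nat) (out : List Int) : List Int :=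
  if h : i < a.length ∧ j < b.length then
    if a[i]'h.1 ≥ b[j]'h.2 then caralho_alt_loop a b (i + 1) j (out ++ [a[i]'h.1])
    else caralho_alt_loop a b i (j + 1) (out ++ [b[j]'h.2])
  else out
termination_by a.length - i + (b.length - j)

def caralho_alt (a : List Int) (b : List Int) : List Int := caralho_alt_loop a b 0 0 []

-- ===== PRECONDITION & SPEC =====
def Spec_caralho (a : List Int) (b : List Int) (out : List Int) : Prop := out = caralho_alt a b
instance (a : List Int) (b : List Int) (out : List Int) : Decidable (Spec_caralho a b out) := by unfold Spec_caralho; infer_instance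

-- ===== CLAIM (what is proved, stated in full; the proofs are below) =====
def Claim_equal_caralho : Prop := ∀ (a : List Int) (b : List Int), Dom_caralho a b → Spec_caralho a b (caralho a b)

-- ===== LEMMAS AND PROOFS =====
theorem alt_loop_eq (a b : List Int) (i j : Nat) (out : List Int) :
    caralho_alt_loop a b i j out = caralho_loop (a.drop i) (b.drop j) out := by
  rw [caralho_alt_loop]
  split
  · rename_i h
    obtain ⟨hi, hj⟩ := h
    rw [List.drop_eq_getElem_cons hi, List.drop_eq_getElem_cons hj, caralho_loop]
    split
    · rw [alt_loop_eq, List.drop_eq_getElem_cons hj]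
    · rw [alt_loop_eq, List.drop_eq_getElem_cons hi]
  · rename_i h
    rcases Decidable.not_and_iff_not_or_not.mp h with h' | h' <;>
      rw [List.drop_eq_nil_of_le (le_of_not_gt h')] <;> cases hd : List.drop j b <;> cases hd2 : List.drop i a <;> simp [caralho_loop]
termination_by a.length - i + (b.length - j)

-- ===== VERDICT (by name: the statement is the Claim_ definition above) =====
theorem caralho_spec : Claim_equal_caralho := by
  intro a b _
  unfold Spec_caralho caralho caralho_alt
  rw [alt_loop_eq]
  rfl
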